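-- pv_equiv track=rewrite | github.com/BradMcDanel/gpt-java-decompiler | generate_gpt_full.py | strip_unnecessary_info
-- ===== SOURCE A (Python) =====
-- def find_used_labels(assembly_code):
--     label_count = {}
--     used_labels = []
--     lines = assembly_code.split('\n')
--
--     for line in lines:
--         parts = line.split()
--         for part in parts:
--             # remove trailing ':' if present
--             if part.endswith(':'):
--                 part = part[:-1]
--
--             # if the part starts with L and rest is number, it's a label
--             if part.startswith('L') and part[1:].isdigit():
--                 label_count[part] = label_count.get(part, 0) + 1
--
--     for label, count in label_count.items():
--         if count >= 2:
--             used_labels.append(label)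
--
--     return used_labels
--
-- def strip_unnecessary_info(java_assembly_code):
--     lines = java_assembly_code.split('\n')
--     stripped_lines = []
--     used_labels = []
--
--     for i, line in enumerate(lines):
--         line = line.strip()
--
--         if line.startswith('.method'):
--             # find next endmethod
--             for j in range(i, len(lines)):
--                 if lines[j].startswith('.end method'):
--                     break
--             used_labels = find_used_labels('\n'.join(lines[i:j]))
--
--         if line.startswith('.'):
--             line = line.lstrip('.')
--         if line.startswith('L'):
--             label = line.split()[0][:-1]
--             if label not in used_labels:
--                 line = line.split(':', 1)[-1].lstrip()
--         if line.endswith(';'):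
--             line = line.rstrip(';')
--         stripped_lines.append(line)
--
--     stripped_java_assembly_code = '\n'.join(stripped_lines).strip()
--     return stripped_java_assembly_code
-- ===== SOURCE B (Python) =====
-- def _duplicated_labels(block_lines):
--     # label -> "seen more than once" flag; dict keeps first-occurrence order
--     seen = {}
--     for ln in block_lines:
--         for tok in ln.split():
--             lab = tok[:-1] if tok.endswith(':') else tok
--             if lab.startswith('L') and lab[1:].isdigit():
--                 seen[lab] = lab in seen
--     return [lab for lab, dup in seen.items() if dup]
--
--
-- def _reformat(line, used):
--     line = line.lstrip('.')
--     if line.startswith('L') and line.split()[0][:-1] not in used: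
--         line = line.split(':', 1)[-1].lstrip()
--     return line.rstrip(';')
--
--
-- def strip_unnecessary_info(java_assembly_code):
--     lines = java_assembly_code.split('\n')
--     n = len(lines)
--     # backward pass: nearest '.end method' line at or after each index (n-1 if none)
--     end_at = []
--     nxt = n - 1
--     for i in range(n - 1, -1, -1):
--         if lines[i].startswith('.end method'):
--             nxt = i
--         end_at.append(nxt)
--     end_at.reverse()
--     # forward pass: apply the stripping rules, refreshing the active labels at '.method'
--     out = []
--     used = []
--     for i, raw in enumerate(lines):
--         line = raw.strip()
--         if line.startswith('.method'):
--             used = _duplicated_labels(lines[i:end_at[i]])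
--         out.append(_reformat(line, used))
--     return '\n'.join(out).strip()
-- ===== Notes on version B (the rewrite author's own statement) =====
-- stated objective: alternative
-- what changed: One backward pass precomputes the nearest end-of-method marker index for every line (replacing A's forward rescan of the rest of the file at every method header), the used-label detection works directly on the block's line list with a seen-twice flag dict instead of A's join/resplit plus a full count dict filtered by count>=2, and the per-line stripping rules are factored into a helper applied in a single forward pass.
import Mathlib
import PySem

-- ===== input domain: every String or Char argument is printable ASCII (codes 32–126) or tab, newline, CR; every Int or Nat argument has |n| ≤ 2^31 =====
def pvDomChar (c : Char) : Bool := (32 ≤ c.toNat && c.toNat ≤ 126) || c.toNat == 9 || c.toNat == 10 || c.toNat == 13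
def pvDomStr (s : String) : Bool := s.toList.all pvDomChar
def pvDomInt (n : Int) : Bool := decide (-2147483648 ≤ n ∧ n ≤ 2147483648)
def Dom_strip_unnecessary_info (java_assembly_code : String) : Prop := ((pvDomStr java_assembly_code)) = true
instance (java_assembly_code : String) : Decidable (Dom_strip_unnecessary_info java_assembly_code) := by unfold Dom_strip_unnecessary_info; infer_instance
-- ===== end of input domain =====

-- B replaces A's per-'.method' forward rescan by one backward pass over the lines and A's
-- count-then-filter label dict (built after a join/resplit of the block) by a seen-twice flag
-- dict over the block's lines directly; objective: alternative (same observable return value).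

-- ===== PORT A =====

-- Python str.lstrip('.'): drop leading '.' characters — exact (hand port, no PySem primitive)
def pyLstripDot (s : String) : String := String.ofList (s.toList.dropWhile (· == '.'))
-- Python str.rstrip(';'): drop trailing ';' characters — exact (hand port, no PySem primitive)
def pyRstripSemi (s : String) : String := String.ofList ((s.toList.reverse.dropWhile (· == ';')).reverse)

def find_used_labels (assembly_code : String) : List String :=
  -- lines = assembly_code.split('\n')  (separator nonempty, so split? is always `some`)
  let lines := (PySem.Str.split? assembly_code "\n").getD []
  let label_count : PySem.Dict String Int :=
    lines.foldl (fun lc line =>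
      (PySem.Str.split₀ line).foldl (fun lc part =>
        let part := if PySem.Str.endswith part ":" then PySem.Str.slice part none (some (-1)) else part
        if PySem.Str.startswith part "L" && PySem.Str.strIsdigit (PySem.Str.slice part (some 1) none) then
          lc.insert part (lc.getD part 0 + 1)
        else lc) lc) PySem.Dict.empty
  label_count.items.foldl (fun used p => if p.2 ≥ 2 then used ++ [p.1] else used) []

def strip_unnecessary_info (java_assembly_code : String) : String :=
  let lines := (PySem.Str.split? java_assembly_code "\n").getD []
  let res := (PySem.List.enumerate lines 0).foldl (fun (st : List String × List String) p =>
    let line := PySem.Str.strip p.2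
    let used_labels :=
      if PySem.Str.startswith line ".method" then
        -- for j in range(i, len(lines)): break at the first '.end method'; j is assigned on the
        -- first iteration (the range is nonempty since i indexes lines), so the initial 0 below
        -- is never the result
        let j := ((PySem.List.pyRange p.1 (lines.length : Int) 1).foldl
          (fun (st : Int × Bool) j =>
            if st.2 then st
            else (j, PySem.Str.startswith (PySem.List.pyGetD lines j "") ".end method")) (0, false)).1
        find_used_labels (PySem.Str.join "\n" (PySem.List.slice lines (some p.1) (some j)))
      else st.2
    let line := if PySem.Str.startswith line "." then pyLstripDot line else line
    let line :=
      if PySem.Str.startswith line "L" then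
        -- line.split()[0]: line starts with 'L', so split() is nonempty and index 0 is in range
        let label := PySem.Str.slice (PySem.List.pyGetD (PySem.Str.split₀ line) 0 "") none (some (-1))
        if label ∉ used_labels then
          -- line.split(':', 1)[-1]: the split is `some` (separator nonempty) and nonempty
          PySem.Str.lstrip (((PySem.Str.splitMax? line ":" 1).getD []).getLastD "")
        else line
      else line
    let line := if PySem.Str.endswith line ";" then pyRstripSemi line else line
    (st.1 ++ [line], used_labels)) ([], [])
  PySem.Str.strip (PySem.Str.join "\n" res.1)

-- ===== PORT B =====

def dupLabels (block_lines : List String) : List String :=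
  let seen : PySem.Dict String Bool :=
    block_lines.foldl (fun seen ln =>
      (PySem.Str.split₀ ln).foldl (fun seen tok =>
        let lab := if PySem.Str.endswith tok ":" then PySem.Str.slice tok none (some (-1)) else tok
        if PySem.Str.startswith lab "L" && PySem.Str.strIsdigit (PySem.Str.slice lab (some 1) none) then
          seen.insert lab (seen.contains lab)
        else seen) seen) PySem.Dict.empty
  (seen.items.filter (fun p => p.2)).map (fun p => p.1)

def reformat (line : String) (used : List String) : String :=
  let line := pyLstripDot line
  let line :=
    if PySem.Str.startswith line "L" &&
       !(used.contains (PySem.Str.slice (PySem.List.pyGetD (PySem.Str.split₀ line) 0 "") none (some (-1)))) then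
      -- line.split()[0] and line.split(':', 1)[-1]: in range as in port A
      PySem.Str.lstrip (((PySem.Str.splitMax? line ":" 1).getD []).getLastD "")
    else line
  pyRstripSemi line

def strip_unnecessary_info_alt (java_assembly_code : String) : String :=
  let lines := (PySem.Str.split? java_assembly_code "\n").getD []
  let n : Int := lines.length
  -- backward pass: for i in range(n-1, -1, -1), appending nxt, then reversed
  let endAt := ((PySem.List.pyRange (n-1) (-1) (-1)).foldl
      (fun (st : List Int × Int) i =>
        let nxt := if PySem.Str.startswith (PySem.List.pyGetD lines i "") ".end method" then i else st.2
        (st.1 ++ [nxt], nxt)) ([], n-1)).1.reverse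
  let out := (PySem.List.enumerate lines 0).foldl (fun (st : List String × List String) p =>
    let line := PySem.Str.strip p.2
    -- end_at[i]: i indexes lines and end_at has one entry per line, so always in range
    let used := if PySem.Str.startswith line ".method" then
        dupLabels (PySem.List.slice lines (some p.1) (some (PySem.List.pyGetD endAt p.1 0)))
      else st.2
    (st.1 ++ [reformat line used], used)) ([], [])
  PySem.Str.strip (PySem.Str.join "\n" out.1)

-- ===== PRECONDITION & SPEC =====
def Spec_strip_unnecessary_info (java_assembly_code : String) (out : String) : Prop := out = strip_unnecessary_info_alt java_assembly_code
instance (java_assembly_code : String) (out : String) : Decidable (Spec_strip_unnecessary_info java_assembly_code out) := by unfold Spec_strip_unnecessary_info; infer_instance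

-- ===== CLAIM (what is proved, stated in full; the proofs are below) =====
def Claim_equal_strip_unnecessary_info : Prop := ∀ (java_assembly_code : String), Dom_strip_unnecessary_info java_assembly_code → Spec_strip_unnecessary_info java_assembly_code (strip_unnecessary_info java_assembly_code)

-- ===== LEMMAS AND PROOFS =====
theorem lstripDot_of_not (s : String) (h : ¬ PySem.Str.startswith s "." = true) :
    pyLstripDot s = s := by
  unfold pyLstripDot
  rw [PySem.Str.startswith_eq, show (".".toList) = ['.'] from rfl] at h
  conv_rhs => rw [← String.ofList_toList (s := s)]
  rcases hl : s.toList with _ | ⟨c, cs⟩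
  · rfl
  · have hc : ¬ c = '.' := fun hc => h (by rw [hl, hc]; simp [PySem.Chars.startswith, List.isPrefixOf])
    rw [List.dropWhile_cons]
    simp only [beq_iff_eq, hc, if_false]

theorem rstripSemi_of_not (s : String) (h : ¬ PySem.Str.endswith s ";" = true) :
    pyRstripSemi s = s := by
  unfold pyRstripSemi
  rw [PySem.Str.endswith_eq, show (";".toList) = [';'] from rfl] at h
  conv_rhs => rw [← String.ofList_toList (s := s), ← List.reverse_reverse (s.toList)]
  rcases hl : s.toList.reverse with _ | ⟨c, cs⟩
  · rfl
  · have hc : ¬ c = ';' := by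
      intro hc; subst hc
      apply h
      have hsuf : [';'] <:+ s.toList := by
        refine ⟨cs.reverse, ?_⟩
        simpa using (congrArg List.reverse hl).symm
      simpa [PySem.Chars.endswith, List.isSuffixOf_iff_suffix] using hsuf
    rw [List.dropWhile_cons]
    simp only [beq_iff_eq, hc, if_false]

theorem rstrip_step (l2 : String) :
    (if PySem.Str.endswith l2 ";" then pyRstripSemi l2 else l2) = pyRstripSemi l2 := by
  by_cases h : PySem.Str.endswith l2 ";" = true
  · rw [if_pos h]
  · rw [if_neg h, rstripSemi_of_not l2 h]

theorem reformat_eq (line : String) (used : List String) :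
    (let l1 := if PySem.Str.startswith line "." then pyLstripDot line else line
     let l2 :=
      if PySem.Str.startswith l1 "L" then
        let label := PySem.Str.slice (PySem.List.pyGetD (PySem.Str.split₀ l1) 0 "") none (some (-1))
        if label ∉ used then
          PySem.Str.lstrip (((PySem.Str.splitMax? l1 ":" 1).getD []).getLastD "")
        else l1
      else l1
     if PySem.Str.endswith l2 ";" then pyRstripSemi l2 else l2) = reformat line used := by
  unfold reformat
  have h1 : (if PySem.Str.startswith line "." then pyLstripDot line else line) = pyLstripDot line := by
    by_cases h : PySem.Str.startswith line "." = true
    · rw [if_pos h]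
    · rw [if_neg h, lstripDot_of_not line h]
  simp only [h1]
  set l1 := pyLstripDot line with hl1
  by_cases h2 : PySem.Str.startswith l1 "L" = true
  · by_cases h3 : PySem.Str.slice (PySem.List.pyGetD (PySem.Str.split₀ l1) 0 "") none (some (-1)) ∈ used
    · have : used.contains (PySem.Str.slice (PySem.List.pyGetD (PySem.Str.split₀ l1) 0 "") none (some (-1))) = true := by
        simpa [List.contains_iff_mem] using h3
      simp only [h2, this, if_true, Bool.not_true, Bool.and_false, Bool.false_eq_true, if_false, h3,
        not_true, rstrip_step]
    · have : used.contains (PySem.Str.slice (PySem.List.pyGetD (PySem.Str.split₀ l1) 0 "") none (some (-1))) = false := by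
        simpa [List.contains_iff_mem] using h3
      simp only [h2, this, if_true, Bool.not_false, Bool.and_true, h3, not_false_iff, rstrip_step]
  · simp only [h2, if_false, Bool.false_and, Bool.false_eq_true, rstrip_step]


def nearEnd : List String → Int → Int
  | [], i => i - 1
  | l :: rest, i => if PySem.Str.startswith l ".end method" then i else nearEnd rest (i + 1)

theorem foldl_broken (l : List Int) (f : Int → String) (j : Int) :
    l.foldl (fun (st : Int × Bool) j =>
      if st.2 then st
      else (j, PySem.Str.startswith (f j) ".end method")) (j, true) = (j, true) := by
  induction l with
  | nil => rfl
  | cons x xs ih => simpa using ih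

theorem foldJ_gen (lines : List String) (k : Nat) (hk : k < lines.length) (j0 : Int) :
    ((PySem.List.pyRange (k : Int) (lines.length : Int) 1).foldl
      (fun (st : Int × Bool) j =>
        if st.2 then st
        else (j, PySem.Str.startswith (PySem.List.pyGetD lines j "") ".end method")) (j0, false)).1
    = nearEnd (lines.drop k) k := by
  have hlt : (k : Int) < (lines.length : Int) := by exact_mod_cast hk
  rw [PySem.List.pyRange_one_cons hlt, List.foldl_cons]
  simp only [if_neg (by simp : ¬ (false = true))]
  rw [PySem.List.pyGetD_natCast, List.getD_eq_getElem lines "" hk,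
    ← List.getElem_cons_drop hk]
  by_cases hp : PySem.Str.startswith lines[k] ".end method" = true
  · rw [hp]
    rw [show nearEnd (lines[k] :: lines.drop (k+1)) k = k by rw [nearEnd, if_pos hp]]
    have := foldl_broken (PySem.List.pyRange ((k : Int) + 1) (lines.length : Int) 1)
      (fun j => PySem.List.pyGetD lines j "") (k : Int)
    simpa using congrArg Prod.fst this
  · rw [show PySem.Str.startswith lines[k] ".end method" = false from by simpa using hp]
    rw [show nearEnd (lines[k] :: lines.drop (k+1)) k = nearEnd (lines.drop (k+1)) (k+1) by
      rw [nearEnd, if_neg hp]]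
    by_cases hk1 : k + 1 < lines.length
    · have := foldJ_gen lines (k+1) hk1 (k : Int)
      rw [show ((k : Int) + 1) = ((k+1 : Nat) : Int) by push_cast; ring]
      rw [show (k : Nat) + 1 = (k+1 : Nat) from rfl] at *
      exact this
    · have hend : lines.length = k + 1 := by omega
      rw [PySem.List.pyRange_one_eq_nil (by exact_mod_cast Nat.le_of_eq hend),
        List.foldl_nil]
      rw [show lines.drop (k+1) = [] from List.drop_eq_nil_of_le (by omega)]
      rw [nearEnd]
      omega
  termination_by lines.length - k

theorem backfold (lines : List String) (m : Nat) (hm : m ≤ lines.length) (acc : List Int)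
    (v : Int) (hv : v = nearEnd (lines.drop m) (m : Int)) :
    (PySem.List.pyRange ((m : Int) - 1) (-1) (-1)).foldl
      (fun (st : List Int × Int) i =>
        let nxt := if PySem.Str.startswith (PySem.List.pyGetD lines i "") ".end method" then i else st.2
        (st.1 ++ [nxt], nxt)) (acc, v)
    = (acc ++ ((List.range m).map (fun i => nearEnd (lines.drop i) (i : Int))).reverse,
       nearEnd lines 0) := by
  subst hv
  induction m generalizing acc with
  | zero =>
    rw [PySem.List.pyRange_neg_one_eq_nil (by omega), List.foldl_nil]
    simp
  | succ m ih =>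
    have hm' : m < lines.length := by omega
    rw [show ((m + 1 : Nat) : Int) - 1 = (m : Int) by push_cast; ring,
      PySem.List.pyRange_neg_one_cons (by omega), List.foldl_cons]
    simp only []
    rw [PySem.List.pyGetD_natCast, List.getD_eq_getElem lines "" hm']
    have hstep : (if PySem.Str.startswith lines[m] ".end method" then (m : Int)
        else nearEnd (lines.drop (m+1)) ((m+1 : Nat) : Int)) = nearEnd (lines.drop m) (m : Int) := by
      conv_rhs => rw [← List.getElem_cons_drop hm', nearEnd]
      by_cases hp : PySem.Str.startswith lines[m] ".end method" = true
      · rw [if_pos hp, if_pos hp]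
      · rw [if_neg hp, if_neg hp]
        norm_num
    rw [hstep]
    rw [ih (by omega) (acc ++ [nearEnd (lines.drop m) (m : Int)])]
    rw [List.range_succ, List.map_append, List.reverse_append]
    simp

theorem endAt_eq' (lines : List String) (k : Nat) (hk : k < lines.length) :
    PySem.List.pyGetD (((PySem.List.pyRange ((lines.length : Int) - 1) (-1) (-1)).foldl
      (fun (st : List Int × Int) i =>
        let nxt := if PySem.Str.startswith (PySem.List.pyGetD lines i "") ".end method" then i else st.2
        (st.1 ++ [nxt], nxt)) ([], (lines.length : Int) - 1)).1.reverse) (k : Int) 0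
    = nearEnd (lines.drop k) k := by
  have hinit : ((lines.length : Int) - 1) = nearEnd (lines.drop lines.length) (lines.length : Int) := by
    rw [List.drop_length, nearEnd]
  rw [backfold lines lines.length le_rfl [] _ hinit]
  simp only [List.nil_append, List.reverse_reverse]
  rw [PySem.List.pyGetD_natCast,
    List.getD_eq_getElem _ 0 (by simpa using hk)]
  simp


theorem go0_acc (s : List Char) (cur : List Char) (acc : List (List Char)) :
    PySem.Chars.split₀.go s cur acc = acc.reverse ++ PySem.Chars.split₀.go s cur [] := by
  induction s generalizing cur acc with
  | nil =>
    rw [PySem.Chars.split₀.go.eq_def, PySem.Chars.split₀.go.eq_def]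
    by_cases hc : cur.isEmpty = true <;> simp [hc]
  | cons c rest ih =>
    rw [PySem.Chars.split₀.go.eq_def]
    conv_rhs => rw [PySem.Chars.split₀.go.eq_def]
    by_cases hs : PySem.Chars.isspace c = true
    · by_cases hc : cur.isEmpty = true
      · simp only [hs, hc, if_true]
        exact ih [] acc
      · simp only [hs, hc, if_true, Bool.false_eq_true, if_false]
        rw [ih [] (cur.reverse :: acc), ih [] [cur.reverse]]
        simp
    · simp only [hs, Bool.false_eq_true, if_false]
      rw [ih (c :: cur) acc]

theorem go0_split (b : List Char) (a : List Char) (cur : List Char) :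
    PySem.Chars.split₀.go (a ++ '\n' :: b) cur []
    = PySem.Chars.split₀.go a cur [] ++ PySem.Chars.split₀.go b [] [] := by
  induction a generalizing cur with
  | nil =>
    rw [List.nil_append, PySem.Chars.split₀.go.eq_def]
    have hs : PySem.Chars.isspace '\n' = true := by decide
    by_cases hc : cur.isEmpty = true
    · simp only [hs, hc, if_true]
      rw [show PySem.Chars.split₀.go [] cur [] = [] by
        rw [PySem.Chars.split₀.go.eq_def]; simp [hc]]
      simp
    · simp only [hs, hc, if_true, if_false]
      rw [go0_acc b [] [cur.reverse],
        show PySem.Chars.split₀.go [] cur [] = [cur.reverse] by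
          rw [PySem.Chars.split₀.go.eq_def]; simp [hc]]
      simp
  | cons c rest ih =>
    rw [List.cons_append, PySem.Chars.split₀.go.eq_def]
    conv_rhs => rw [PySem.Chars.split₀.go.eq_def (c :: rest)]
    by_cases hs : PySem.Chars.isspace c = true
    · by_cases hc : cur.isEmpty = true
      · simp only [hs, hc, if_true]; exact ih []
      · simp only [hs, hc, if_true, if_false]
        rw [go0_acc _ [] (cur.reverse :: []), ih [], go0_acc rest []  (cur.reverse :: [])]
        simp
    · simp only [hs, if_false]; exact ih (c :: cur)

theorem split₀_append (a b : List Char) :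
    PySem.Chars.split₀ (a ++ '\n' :: b) = PySem.Chars.split₀ a ++ PySem.Chars.split₀ b := by
  show PySem.Chars.split₀.go _ [] [] = _
  rw [go0_split]
  rfl

theorem goS_acc (sep : List Char) (fuel : Nat) (l cur : List Char) (acc : List (List Char)) :
    PySem.Chars.splitOn.go sep fuel l cur acc
    = acc.reverse ++ PySem.Chars.splitOn.go sep fuel l cur [] := by
  induction fuel generalizing l cur acc with
  | zero =>
    rw [PySem.Chars.splitOn.go.eq_def, PySem.Chars.splitOn.go.eq_def]
    simp
  | succ fuel ih =>
    rcases l with _ | ⟨c, rest⟩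
    · rw [PySem.Chars.splitOn.go.eq_def, PySem.Chars.splitOn.go.eq_def]
      simp
    · rw [PySem.Chars.splitOn.go.eq_def]
      conv_rhs => rw [PySem.Chars.splitOn.go.eq_def]
      simp only []
      by_cases hp : sep.isPrefixOf (c :: rest) = true
      · simp only [hp, if_true]
        rw [ih _ [] (cur.reverse :: acc), ih _ [] [cur.reverse]]
        simp
      · simp only [hp, Bool.false_eq_true, if_false]
        exact ih rest (c :: cur) acc

theorem goS_ne_nil (sep : List Char) (fuel : Nat) (l cur : List Char) (acc : List (List Char)) :
    PySem.Chars.splitOn.go sep fuel l cur acc ≠ [] := by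
  induction fuel generalizing l cur acc with
  | zero => rw [PySem.Chars.splitOn.go.eq_def]; simp
  | succ fuel ih =>
    rcases l with _ | ⟨c, rest⟩
    · rw [PySem.Chars.splitOn.go.eq_def]; simp
    · rw [PySem.Chars.splitOn.go.eq_def]
      simp only []
      by_cases hp : sep.isPrefixOf (c :: rest) = true
      · simp only [hp, if_true]; exact ih _ [] _
      · simp only [hp, Bool.false_eq_true, if_false]; exact ih rest (c :: cur) acc

theorem goS_join (sep : List Char) (fuel : Nat) (l cur : List Char) :
    PySem.Chars.join sep (PySem.Chars.splitOn.go sep fuel l cur [])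
    = cur.reverse ++ l := by
  induction fuel generalizing l cur with
  | zero =>
    rw [PySem.Chars.splitOn.go.eq_def]
    simpa using PySem.Chars.join_singleton _ _
  | succ fuel ih =>
    rcases l with _ | ⟨c, rest⟩
    · rw [PySem.Chars.splitOn.go.eq_def]
      simpa using PySem.Chars.join_singleton _ _
    · rw [PySem.Chars.splitOn.go.eq_def]
      simp only []
      by_cases hp : sep.isPrefixOf (c :: rest) = true
      · simp only [hp, if_true]
        rw [goS_acc sep fuel _ [] [cur.reverse]]
        rcases hgo : PySem.Chars.splitOn.go sep fuel (List.drop sep.length (c :: rest)) [] [] with _ | ⟨q, tl⟩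
        · exact absurd hgo (goS_ne_nil _ _ _ _ _)
        · simp only [List.reverse_cons, List.reverse_nil, List.nil_append]
          rw [show ([cur.reverse] : List (List Char)) ++ q :: tl = cur.reverse :: q :: tl from rfl,
            PySem.Chars.join_cons_cons, ← hgo, ih]
          have hpre : sep ++ List.drop sep.length (c :: rest) = c :: rest :=
            List.prefix_iff_eq_append.mp (List.isPrefixOf_iff_prefix.mp hp)
          simp only [List.reverse_nil, List.nil_append, List.append_assoc]
          rw [hpre]
      · simp only [hp, Bool.false_eq_true, if_false]
        rw [ih rest (c :: cur)]
        simp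

theorem join_splitOn (s sep : List Char) :
    PySem.Chars.join sep (PySem.Chars.splitOn s sep) = s := by
  show PySem.Chars.join sep (PySem.Chars.splitOn.go sep (s.length + 1) s [] []) = s
  rw [goS_join]
  rfl

theorem split₀_join (ms : List (List Char)) :
    PySem.Chars.split₀ (PySem.Chars.join ['\n'] ms) = ms.flatMap PySem.Chars.split₀ := by
  induction ms with
  | nil => rw [PySem.Chars.join_nil]; rfl
  | cons m ms ih =>
    rcases ms with _ | ⟨m', ms'⟩
    · rw [PySem.Chars.join_singleton]; simp
    · rw [PySem.Chars.join_cons_cons,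
        show m ++ ['\n'] ++ PySem.Chars.join ['\n'] (m' :: ms')
          = m ++ '\n' :: PySem.Chars.join ['\n'] (m' :: ms') by simp,
        split₀_append, ih]
      simp

theorem tokens_chars (ms : List (List Char)) :
    (PySem.Chars.splitOn (PySem.Chars.join ['\n'] ms) ['\n']).flatMap PySem.Chars.split₀
    = ms.flatMap PySem.Chars.split₀ := by
  rw [← split₀_join (PySem.Chars.splitOn (PySem.Chars.join ['\n'] ms) ['\n']),
    join_splitOn, split₀_join]

theorem tokens_str (ls : List String) :
    ((PySem.Str.split? (PySem.Str.join "\n" ls) "\n").getD []).flatMap PySem.Str.split₀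
    = ls.flatMap PySem.Str.split₀ := by
  have hinj : Function.Injective (List.map String.toList) :=
    List.map_injective_iff.mpr (fun a b h => String.toList_inj.mp h)
  apply hinj
  have hsplit : PySem.Str.split? (PySem.Str.join "\n" ls) "\n"
      = some (((PySem.Chars.splitOn (PySem.Str.join "\n" ls).toList ['\n']).map String.ofList)) := by
    have h1 := PySem.Str.split?_map (PySem.Str.join "\n" ls) "\n"
    rw [show PySem.Chars.split? (PySem.Str.join "\n" ls).toList "\n".toList
        = some (PySem.Chars.splitOn (PySem.Str.join "\n" ls).toList ['\n']) from rfl] at h1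
    rcases hx : PySem.Str.split? (PySem.Str.join "\n" ls) "\n" with _ | L
    · rw [hx] at h1; simp at h1
    · rw [hx] at h1
      simp only [Option.map_some, Option.some.injEq] at h1
      rw [← h1]
      congr 1
      rw [List.map_map]
      conv_lhs => rw [show L = List.map id L by simp]
      apply List.map_congr_left
      intro a _
      simp [String.ofList_toList]
  rw [hsplit]
  simp only [Option.getD_some]
  rw [List.map_flatMap, List.map_flatMap]
  simp only [PySem.Str.split₀_map_toList]
  rw [List.flatMap_map]
  simp only [Function.comp, String.toList_ofList]
  have hJ : (PySem.Str.join "\n" ls).toList = PySem.Chars.join ['\n'] (ls.map String.toList) := by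
    rw [PySem.Str.toList_join]; rfl
  rw [show (fun a => PySem.Chars.split₀ a.toList) = (PySem.Chars.split₀ ∘ String.toList) from rfl,
    ← List.flatMap_map, hJ]
  simpa [List.flatMap_map] using tokens_chars (ls.map String.toList)

def normTok (t : String) : String :=
  if PySem.Str.endswith t ":" then PySem.Str.slice t none (some (-1)) else t

def isLab (t : String) : Bool :=
  PySem.Str.startswith t "L" && PySem.Str.strIsdigit (PySem.Str.slice t (some 1) none)

theorem fold_norm_filter {σ : Type} (g : σ → String → σ) (xs : List String) (st : σ) :
    xs.foldl (fun s t => if isLab (normTok t) = true then g s (normTok t) else s) st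
    = ((xs.map normTok).filter isLab).foldl g st := by
  induction xs generalizing st with
  | nil => rfl
  | cons x xs ih =>
    rw [List.foldl_cons, List.map_cons, List.filter_cons]
    by_cases h : isLab (normTok x) = true
    · rw [if_pos h, h, if_pos rfl, List.foldl_cons, ih]
    · rw [if_neg h, show isLab (normTok x) = false by simpa using h]
      simp only [Bool.false_eq_true, if_false]
      exact ih st

theorem fold_append_ge2 (items : List (String × Int)) (acc : List String) :
    items.foldl (fun used p => if p.2 ≥ 2 then used ++ [p.1] else used) acc
    = acc ++ (items.filter (fun p => decide (2 ≤ p.2))).map Prod.fst := by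
  induction items generalizing acc with
  | nil => simp
  | cons p ps ih =>
    rw [List.foldl_cons, List.filter_cons]
    by_cases h : (2 : Int) ≤ p.2
    · rw [if_pos h, ih, decide_eq_true h]
      simp
    · rw [if_neg h, ih, decide_eq_false h]
      simp

theorem mem_update_nil {α : Type} [BEq α] [LawfulBEq α] (l : List α) (x : α) :
    x ∈ PySem.Set.update ([] : PySem.Set α) l ↔ x ∈ l := by
  rw [show PySem.Set.update ([] : PySem.Set α) l = PySem.Set.ofList l from rfl]
  exact PySem.Set.mem_ofList l x

theorem seen_contains (labs : List String) (k : String) :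
    (labs.foldl (fun d x => d.insert x (d.contains x)) (PySem.Dict.empty : PySem.Dict String Bool)).contains k
    = decide (k ∈ labs) := by
  rw [Bool.eq_iff_iff, PySem.Dict.contains_iff_mem_keys,
    PySem.Dict.keys_foldl_insert labs (fun d x => d.contains x) PySem.Dict.empty]
  rw [show (PySem.Dict.empty : PySem.Dict String Bool).keys = [] from rfl]
  rw [mem_update_nil]
  simp

theorem seen_getD (labs : List String) (k : String) :
    (labs.foldl (fun d x => d.insert x (d.contains x)) (PySem.Dict.empty : PySem.Dict String Bool)).getD k false
    = decide (2 ≤ labs.count k) := by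
  induction labs using List.reverseRecOn with
  | nil => rfl
  | append_singleton l x ih =>
    rw [List.foldl_append, List.foldl_cons, List.foldl_nil]
    by_cases hkx : k = x
    · subst hkx
      rw [PySem.Dict.getD_insert_self, seen_contains, decide_eq_decide,
        List.count_append, ← List.count_pos_iff]
      simp only [List.count_cons_self, List.count_nil, Nat.zero_add]
      omega
    · rw [PySem.Dict.getD_insert]
      rw [if_neg hkx, ih, decide_eq_decide, List.count_append]
      have hxk : ¬ x = k := fun h => hkx (Eq.symm h)
      have : List.count k [x] = 0 := by
        simp [List.count_singleton, hxk]
      omega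


theorem counter_items (labs : List String) :
    (PySem.Dict.counter (κ := String) labs).items
    = (PySem.List.dedup labs).map (fun k => (k, ((labs.count k : Nat) : Int))) := by
  have hkeys : (PySem.Dict.counter (κ := String) labs).keys = PySem.List.dedup labs := by
    rw [PySem.Dict.counter_eq_foldl, PySem.Dict.keys_foldl_modify labs 0 (fun _ _ => (· + 1))]
    rw [show (PySem.Dict.empty : PySem.Dict String Int).keys = [] from rfl]
    rw [show PySem.Set.update ([] : PySem.Set String) labs = PySem.Set.ofList labs from rfl]
    simp
  have hnodup : (PySem.Dict.counter (κ := String) labs).keys.Nodup := by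
    rw [hkeys]; exact PySem.List.nodup_dedup labs
  rw [PySem.Dict.items_eq_map_keys _ hnodup 0, hkeys]
  apply List.map_congr_left; intro k hk
  rw [PySem.Dict.getD_counter]

theorem seen_items (labs : List String) :
    (labs.foldl (fun d x => d.insert x (d.contains x)) (PySem.Dict.empty : PySem.Dict String Bool)).items
    = (PySem.List.dedup labs).map (fun k => (k, decide (2 ≤ labs.count k))) := by
  have hkeys : (labs.foldl (fun d x => d.insert x (d.contains x)) (PySem.Dict.empty : PySem.Dict String Bool)).keys
      = PySem.List.dedup labs := by
    rw [PySem.Dict.keys_foldl_insert labs (fun d x => d.contains x) PySem.Dict.empty]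
    rw [show (PySem.Dict.empty : PySem.Dict String Bool).keys = [] from rfl]
    rw [show PySem.Set.update ([] : PySem.Set String) labs = PySem.Set.ofList labs from rfl]
    simp
  have hnodup : (labs.foldl (fun d x => d.insert x (d.contains x)) (PySem.Dict.empty : PySem.Dict String Bool)).keys.Nodup := by
    rw [hkeys]; exact PySem.List.nodup_dedup labs
  rw [PySem.Dict.items_eq_map_keys _ hnodup false, hkeys]
  apply List.map_congr_left; intro k hk
  rw [seen_getD]

theorem labels_eq (ls : List String) :
    find_used_labels (PySem.Str.join "\n" ls) = dupLabels ls := by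
  unfold find_used_labels dupLabels
  simp only []
  rw [← List.foldl_flatMap, ← List.foldl_flatMap]
  rw [show (((PySem.Str.split? (PySem.Str.join "\n" ls) "\n").getD []).flatMap PySem.Str.split₀)
      = ls.flatMap PySem.Str.split₀ from tokens_str ls]
  have hA : (ls.flatMap PySem.Str.split₀).foldl
      (fun (lc : PySem.Dict String Int) part =>
        let part2 := if PySem.Str.endswith part ":" then PySem.Str.slice part none (some (-1)) else part
        if PySem.Str.startswith part2 "L" && PySem.Str.strIsdigit (PySem.Str.slice part2 (some 1) none) then
          lc.insert part2 (lc.getD part2 0 + 1)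
        else lc) PySem.Dict.empty
      = PySem.Dict.counter (((ls.flatMap PySem.Str.split₀).map normTok).filter isLab) := by
    rw [PySem.Dict.counter_eq_foldl]
    exact fold_norm_filter (fun (lc : PySem.Dict String Int) p => lc.insert p (lc.getD p 0 + 1)) _ _
  have hB : (ls.flatMap PySem.Str.split₀).foldl
      (fun (seen : PySem.Dict String Bool) tok =>
        let lab := if PySem.Str.endswith tok ":" then PySem.Str.slice tok none (some (-1)) else tok
        if PySem.Str.startswith lab "L" && PySem.Str.strIsdigit (PySem.Str.slice lab (some 1) none) then
          seen.insert lab (seen.contains lab)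
        else seen) PySem.Dict.empty
      = (((ls.flatMap PySem.Str.split₀).map normTok).filter isLab).foldl
          (fun d x => d.insert x (d.contains x)) PySem.Dict.empty :=
    fold_norm_filter (fun (d : PySem.Dict String Bool) x => d.insert x (d.contains x)) _ _
  rw [hA, hB]
  set labs := ((ls.flatMap PySem.Str.split₀).map normTok).filter isLab with hlabs
  rw [fold_append_ge2, counter_items, seen_items]
  rw [List.filter_map, List.filter_map, List.map_map, List.map_map]
  rw [List.nil_append]
  rw [List.filter_congr (l := PySem.List.dedup labs)
    (q := fun k => decide (2 ≤ labs.count k)) (by intro x hx; simp)]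
  simp only [Function.comp_def]

theorem folds_eq (lines : List String) :
    (PySem.List.enumerate lines 0).foldl (fun (st : List String × List String) p =>
      let line := PySem.Str.strip p.2
      let used_labels :=
        if PySem.Str.startswith line ".method" then
          let j := ((PySem.List.pyRange p.1 (lines.length : Int) 1).foldl
            (fun (st : Int × Bool) j =>
              if st.2 then st
              else (j, PySem.Str.startswith (PySem.List.pyGetD lines j "") ".end method")) (0, false)).1
          find_used_labels (PySem.Str.join "\n" (PySem.List.slice lines (some p.1) (some j)))
        else st.2
      let line := if PySem.Str.startswith line "." then pyLstripDot line else line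
      let line :=
        if PySem.Str.startswith line "L" then
          let label := PySem.Str.slice (PySem.List.pyGetD (PySem.Str.split₀ line) 0 "") none (some (-1))
          if label ∉ used_labels then
            PySem.Str.lstrip (((PySem.Str.splitMax? line ":" 1).getD []).getLastD "")
          else line
        else line
      let line := if PySem.Str.endswith line ";" then pyRstripSemi line else line
      (st.1 ++ [line], used_labels)) ([], [])
    = (PySem.List.enumerate lines 0).foldl (fun (st : List String × List String) p =>
      let line := PySem.Str.strip p.2
      let used := if PySem.Str.startswith line ".method" then
          dupLabels (PySem.List.slice lines (some p.1) (some (PySem.List.pyGetD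
            (((PySem.List.pyRange ((lines.length : Int) - 1) (-1) (-1)).foldl
              (fun (st : List Int × Int) i =>
                let nxt := if PySem.Str.startswith (PySem.List.pyGetD lines i "") ".end method" then i else st.2
                (st.1 ++ [nxt], nxt)) ([], (lines.length : Int) - 1)).1.reverse) p.1 0)))
        else st.2
      (st.1 ++ [reformat line used], used)) ([], []) := by
  apply PySem.List.foldl_congr_mem
  intro acc p hp
  rw [PySem.List.mem_enumerate_iff] at hp
  obtain ⟨k, hk, rfl⟩ := hp
  simp only [Int.zero_add]
  by_cases hm : PySem.Str.startswith (PySem.Str.strip lines[k]) ".method" = true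
  · simp only [hm, if_true, foldJ_gen lines k hk 0, endAt_eq' lines k hk, labels_eq,
      reformat_eq]
  · simp only [hm, if_false, Bool.false_eq_true, reformat_eq]

theorem strip_alt_eq (code : String) :
    strip_unnecessary_info code = strip_unnecessary_info_alt code := by
  unfold strip_unnecessary_info strip_unnecessary_info_alt
  simp only [folds_eq]

-- ===== VERDICT (by name: the statement is the Claim_ definition above) =====
theorem strip_unnecessary_info_spec : Claim_equal_strip_unnecessary_info := by
  intro code _
  exact strip_alt_eq code
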